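-- pv_equiv track=rewrite | github.com/jeremyzanella0/2025-2026 | pscoding6.py | parse_player_def
-- ===== SOURCE A (Python) =====
-- def parse_player_def(token: str):
--     """
--     Splits a token like '2/7^d+' or '1/rot2+' into (off_player, def_player, action).
--     - If '/' not present, returns (token, None, "").
--     - Handles 'rot' defenders as well as digits.
--     """
--     if "/" not in token:
--         return token, None, ""
--     off, rest = token.split("/", 1)
--     # Parse defender: either digits or rot#
--     i = 0
--     if rest.startswith("rot"):
--         # defender is rot#
--         j = 3
--         while j < len(rest) and rest[j].isdigit():
--             j += 1
--         def_player = rest[:j]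
--         action = rest[j:] if j < len(rest) else ""
--     else:
--         while i < len(rest) and rest[i].isdigit():
--             i += 1
--         def_player = rest[:i] if i > 0 else None
--         action = rest[i:] if i < len(rest) else ""
--     return off, def_player, action
-- ===== SOURCE B (Python) =====
-- def _split_digits(s):
--     # recursively peel the leading digit run: returns (digit_prefix, remainder)
--     if s and s[0].isdigit():
--         d, a = _split_digits(s[1:])
--         return s[0] + d, a
--     return "", s
--
-- def parse_player_def(token: str):
--     off, sep, rest = token.partition("/")
--     if not sep:
--         return token, None, ""
--     pre, tail = ("rot", rest[3:]) if rest.startswith("rot") else ("", rest)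
--     digits, action = _split_digits(tail)
--     defender = pre + digits
--     return off, defender or None, action
-- ===== Notes on version B (the rewrite author's own statement) =====
-- stated objective: alternative
-- what changed: Replaces A's split('/',1)+membership test and two index-tracking while loops with four branch exits by str.partition, a recursive digit-run splitter returning (digits, remainder) pairs, and the rot case collapsed into a (prefix, tail) tuple selection so one code path assembles the result.
import Mathlib
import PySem

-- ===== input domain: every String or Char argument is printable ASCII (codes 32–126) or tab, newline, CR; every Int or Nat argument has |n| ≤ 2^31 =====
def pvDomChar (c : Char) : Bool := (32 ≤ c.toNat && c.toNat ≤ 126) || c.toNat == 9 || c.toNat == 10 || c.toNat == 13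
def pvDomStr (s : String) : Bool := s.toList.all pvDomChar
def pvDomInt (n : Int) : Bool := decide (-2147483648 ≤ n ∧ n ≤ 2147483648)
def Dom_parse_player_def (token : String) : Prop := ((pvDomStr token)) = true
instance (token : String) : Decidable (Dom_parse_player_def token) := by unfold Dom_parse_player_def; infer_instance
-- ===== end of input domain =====

-- B replaces A's split+membership test and two index-walking while loops (four branch exits)
-- by str.partition, a recursive digit-run splitter, and a (prefix, tail) tuple selection for
-- the rot case; objective: alternative decomposition, same cost.

-- ===== PORT A =====
-- the while loop 'while j < len(rest) and rest[j].isdigit(): j += 1' as structural recursion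
-- over the suffix of rest starting at j (exact: advances j past consecutive digits)
def pvDigitEnd : List Char → Nat → Nat
  | [], j => j
  | c :: cs, j => if PySem.Chars.isdigit c then pvDigitEnd cs (j + 1) else j

def parse_player_def (token : String) : String × Option String × String :=
  if !(PySem.Str.isIn "/" token) then (token, none, "")
  else
    let parts := (PySem.Str.splitMax? token "/" 1).getD []   -- off, rest = token.split("/", 1)
    let off := parts.getD 0 ""
    let rest := (parts.getD 1 "").toList                      -- rest handled as its code points
    if PySem.Chars.startswith rest "rot".toList then
      let j := pvDigitEnd (rest.drop 3) 3
      let def_player := String.ofList (rest.take j)           -- rest[:j] (j ≥ 0: slice = take)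
      let action := if j < rest.length then String.ofList (rest.drop j) else ""
      (off, some def_player, action)
    else
      let i := pvDigitEnd rest 0
      let def_player := if 0 < i then some (String.ofList (rest.take i)) else none
      let action := if i < rest.length then String.ofList (rest.drop i) else ""
      (off, def_player, action)

-- ===== PORT B =====
-- _split_digits, recursion on the string's characters (exact: one char peeled per call)
def pvSplitDigits : List Char → List Char × List Char
  | [] => ([], [])
  | c :: cs =>
      if PySem.Chars.isdigit c then
        let (d, a) := pvSplitDigits cs
        (c :: d, a)
      else ([], c :: cs)

def parse_player_def_alt (token : String) : String × Option String × String :=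
  let ts := token.toList
  -- token.partition("/"), hand-ported (exact: off = part before the FIRST '/', rest = after it)
  let off := ts.takeWhile (· ≠ '/')
  let rest := (ts.dropWhile (· ≠ '/')).tail
  if '/' ∈ ts then                                            -- 'if not sep: …' inverted
    let pt := if PySem.Chars.startswith rest "rot".toList
              then ("rot".toList, rest.drop 3) else ([], rest)
    let da := pvSplitDigits pt.2
    let defender := pt.1 ++ da.1
    (String.ofList off,
     if defender = [] then none else some (String.ofList defender),    -- defender or None
     String.ofList da.2)
  else (token, none, "")

-- ===== PRECONDITION & SPEC =====
def Spec_parse_player_def (token : String) (out : String × Option String × String) : Prop := out = parse_player_def_alt token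
instance (token : String) (out : String × Option String × String) : Decidable (Spec_parse_player_def token out) := by unfold Spec_parse_player_def; infer_instance

-- ===== CLAIM (what is proved, stated in full; the proofs are below) =====
def Claim_equal_parse_player_def : Prop := ∀ (token : String), Dom_parse_player_def token → Spec_parse_player_def token (parse_player_def token)

-- ===== LEMMAS AND PROOFS =====

lemma pvSplitDigits_eq (l : List Char) :
    pvSplitDigits l = (l.takeWhile PySem.Chars.isdigit, l.dropWhile PySem.Chars.isdigit) := by
  induction l with
  | nil => rfl
  | cons c cs ih =>
      by_cases h : PySem.Chars.isdigit c <;>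
        simp [pvSplitDigits, List.takeWhile, List.dropWhile, h, ih]

lemma pvDigitEnd_eq (l : List Char) (j : Nat) :
    pvDigitEnd l j = j + (l.takeWhile PySem.Chars.isdigit).length := by
  induction l generalizing j with
  | nil => simp [pvDigitEnd]
  | cons c cs ih =>
      by_cases h : PySem.Chars.isdigit c
      · simp [pvDigitEnd, h, ih]; omega
      · simp [pvDigitEnd, h]

lemma pv_dropWhile_eq_drop (l : List Char) (p : Char → Bool) :
    l.dropWhile p = l.drop (l.takeWhile p).length := by
  induction l with
  | nil => rfl
  | cons c cs ih => by_cases h : p c <;> simp [List.dropWhile, List.takeWhile, h, ih]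

lemma pv_takeWhile_eq_take (l : List Char) (p : Char → Bool) :
    l.takeWhile p = l.take (l.takeWhile p).length :=
  List.prefix_iff_eq_take.mp (l.takeWhile_prefix p)

lemma pv_takeWhile_le (l : List Char) (p : Char → Bool) :
    (l.takeWhile p).length ≤ l.length := (l.takeWhile_sublist (p := p)).length_le

lemma pv_action_if (l : List Char) (j : Nat) :
    (if j < l.length then String.ofList (l.drop j) else "") = String.ofList (l.drop j) := by
  split
  · rfl
  · rw [List.drop_eq_nil_of_le (by omega)]

lemma pv_go_zero (fuel : Nat) (l cur : List Char) (acc : List (List Char)) :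
    PySem.Chars.splitOnMax.go ['/'] fuel 0 l cur acc = ((cur.reverse ++ l) :: acc).reverse := by
  cases fuel with
  | zero => rfl
  | succ n => cases l with
      | nil => simp [PySem.Chars.splitOnMax.go]
      | cons c cs => simp [PySem.Chars.splitOnMax.go]

lemma pv_go_one (fuel : Nat) (l cur : List Char) (acc : List (List Char)) (h : l.length < fuel) :
    PySem.Chars.splitOnMax.go ['/'] fuel 1 l cur acc =
      acc.reverse ++ (if '/' ∈ l then
        [cur.reverse ++ l.takeWhile (· ≠ '/'), (l.dropWhile (· ≠ '/')).tail]
      else [cur.reverse ++ l]) := by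
  induction fuel generalizing l cur acc with
  | zero => omega
  | succ n ih =>
      cases l with
      | nil => simp [PySem.Chars.splitOnMax.go]
      | cons c cs =>
          by_cases hc : c = '/'
          · subst hc
            have : (['/'] : List Char).isPrefixOf ('/' :: cs) = true := by simp [List.isPrefixOf]
            simp [PySem.Chars.splitOnMax.go, this, pv_go_zero, List.takeWhile, List.dropWhile]
          · have hp : (['/'] : List Char).isPrefixOf (c :: cs) = false := by
              simp [List.isPrefixOf]; exact fun e => hc e.symm
            have hc' : ¬('/' = c) := fun e => hc e.symm
            have := ih cs (c :: cur) acc (by simpa using Nat.lt_of_succ_lt_succ h)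
            simp only [PySem.Chars.splitOnMax.go, hp] at *
            simp [hc, hc', this, List.takeWhile, List.dropWhile]

lemma pv_split_eq (token : String) (h : '/' ∈ token.toList) :
    PySem.Str.splitMax? token "/" 1 =
      some [String.ofList (token.toList.takeWhile (· ≠ '/')),
            String.ofList ((token.toList.dropWhile (· ≠ '/')).tail)] := by
  have hs : ("/" : String).toList = ['/'] := by decide
  rw [PySem.Str.splitMax?, hs, PySem.Chars.splitMax?]
  simp only [List.isEmpty_cons]
  rw [PySem.Chars.splitOnMax, if_neg (by norm_num)]
  have h1 : ((1 : Int)).toNat = 1 := rfl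
  rw [h1, pv_go_one _ _ _ _ (by omega)]
  simp [h]

lemma pv_isIn_iff (token : String) : PySem.Str.isIn "/" token = true ↔ '/' ∈ token.toList := by
  rw [PySem.Str.isIn_iff_infix]
  have hs : ("/" : String).toList = ['/'] := by decide
  rw [hs, List.singleton_infix_iff]

lemma pv_main (token : String) : parse_player_def token = parse_player_def_alt token := by
  by_cases h : '/' ∈ token.toList
  · have hin : PySem.Str.isIn "/" token = true := (pv_isIn_iff token).mpr h
    unfold parse_player_def parse_player_def_alt
    rw [pv_split_eq token h]
    simp only [hin, h, Bool.not_true, Bool.false_eq_true, if_false, if_true, Option.getD_some,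
      List.getD_cons_zero, List.getD_cons_succ, String.toList_ofList, pvDigitEnd_eq,
      pvSplitDigits_eq, Nat.zero_add]
    set rest := (token.toList.dropWhile (· ≠ '/')).tail with hrest
    by_cases hrot : PySem.Chars.startswith rest "rot".toList = true
    · have hpre : "rot".toList <+: rest :=
        (PySem.Chars.startswith_iff (s := rest) (p := "rot".toList)).mp hrot
      have hlen : 3 ≤ rest.length := by
        have h2 := hpre.length_le; simpa using h2
      set k := ((rest.drop 3).takeWhile PySem.Chars.isdigit).length with hk
      have hk3 : k ≤ rest.length - 3 := by
        have := pv_takeWhile_le (rest.drop 3) PySem.Chars.isdigit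
        simpa using this
      simp only [hrot, if_true]
      rw [pv_dropWhile_eq_drop (rest.drop 3) PySem.Chars.isdigit, List.drop_drop, ← hk]
      rw [pv_action_if]
      have htake3 : rest.take 3 = "rot".toList := by
        rcases hpre with ⟨t, ht⟩
        rw [← ht, List.take_append_of_le_length (by simp)]
        simp
      have hsplit : rest.take (3 + k) = "rot".toList ++ (rest.drop 3).takeWhile PySem.Chars.isdigit := by
        rw [List.take_add, htake3, ← pv_takeWhile_eq_take]
      rw [hsplit, if_neg (by simp)]
    · simp only [hrot, Bool.false_eq_true, if_false]
      set k := (rest.takeWhile PySem.Chars.isdigit).length with hk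
      rw [pv_dropWhile_eq_drop rest PySem.Chars.isdigit, ← hk]
      rw [pv_action_if]
      by_cases hz : 0 < k
      · have hne : rest.takeWhile PySem.Chars.isdigit ≠ [] := by
          rw [← List.length_pos_iff]; omega
        rw [pv_takeWhile_eq_take rest PySem.Chars.isdigit, ← hk] at hne ⊢
        simp [hz, hne]
      · have hk0 : k = 0 := by omega
        have hnil : rest.takeWhile PySem.Chars.isdigit = [] := by
          rw [← List.length_eq_zero_iff]; omega
        simp [hk0, hnil]
  · have hin : PySem.Str.isIn "/" token = false := by
      rw [← Bool.not_eq_true, pv_isIn_iff]; exact h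
    have hin' : PySem.Chars.isIn ['/'] token.toList = false := by
      have h1 := hin
      rwa [show PySem.Str.isIn "/" token = PySem.Chars.isIn ['/'] token.toList from by
        simp [show ("/" : String).toList = ['/'] from by decide]] at h1
    unfold parse_player_def parse_player_def_alt
    simp [hin', h]

-- ===== VERDICT (by name: the statement is the Claim_ definition above) =====
theorem parse_player_def_spec : Claim_equal_parse_player_def := by
  intro token _
  unfold Spec_parse_player_def
  exact pv_main token
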